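-- pv_equiv track=rewrite | github.com/jramaswami/Binary_Search_Python | bus_stop.py | solve
-- ===== SOURCE A (Python) =====
-- import collections
--
-- def solve(nums):
--     queue = collections.deque(nums)
--     new_queue = collections.deque()
--     soln = 0
--     while queue:
--         curr = 0
--         soln += 1
--         for bus in queue:
--             if bus > curr:
--                 curr = bus
--             else:
--                 new_queue.append(bus)
--         queue, new_queue = new_queue, collections.deque()
--     return soln
-- ===== SOURCE B (Python) =====
-- import bisect
--
-- def solve(nums):
--     # patience sorting: one left-to-right pass; neg holds, sorted non-decreasing,
--     # the negated last value removed in each greedy pass so far; answer = number of passes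
--     neg = []
--     for v in nums:
--         k = -v
--         i = bisect.bisect_right(neg, k)
--         if i == len(neg):
--             neg.append(k)
--         else:
--             neg[i] = k
--     return len(neg)
-- ===== Notes on version B (the rewrite author's own statement) =====
-- stated objective: faster
-- what changed: Replaces A's repeated sweep-and-requeue simulation (one full scan of the remaining queue per pass) by a single left-to-right patience-sorting pass that maintains the sorted list of per-pass last values and places each element with bisect; the answer is the final list's length.
import Mathlib
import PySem

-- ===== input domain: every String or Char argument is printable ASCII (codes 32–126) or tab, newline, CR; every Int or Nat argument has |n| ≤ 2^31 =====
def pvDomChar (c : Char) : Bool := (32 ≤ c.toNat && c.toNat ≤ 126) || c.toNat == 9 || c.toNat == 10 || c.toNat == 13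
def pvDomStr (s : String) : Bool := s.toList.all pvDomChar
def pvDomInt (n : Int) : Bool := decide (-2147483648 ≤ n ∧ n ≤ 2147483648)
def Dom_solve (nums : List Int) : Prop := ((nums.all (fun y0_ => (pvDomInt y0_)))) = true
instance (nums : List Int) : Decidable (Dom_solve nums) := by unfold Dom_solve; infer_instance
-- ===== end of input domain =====

-- B replaces A's repeated pass simulation by one-pass patience sorting with binary search (faster).

-- ===== PORT A =====
-- one while-loop body ("pass"): returns (final curr, new_queue = kept elements, in order)
def solvePass : Int → List Int → Int × List Int
  | curr, [] => (curr, [])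
  | curr, b :: rest =>
      if b > curr then solvePass b rest
      else
        let ck := solvePass curr rest
        (ck.1, b :: ck.2)

-- the while loop; fuel = initial queue length (under Pre_ every pass removes the
-- first element, so the number of passes never exceeds the length — pure totality device)
def solveLoop : Nat → List Int → Int
  | 0, _ => 0
  | _ + 1, [] => 0
  | fuel + 1, b :: rest => 1 + solveLoop fuel (solvePass 0 (b :: rest)).2

def solve (nums : List Int) : Int := solveLoop nums.length nums

-- ===== PORT B =====
-- bisect.bisect_right + replace/append on the sorted list `neg`, ported as the
-- value-equal linear "replace first element greater than k, else append"
def insPat : List Int → Int → List Int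
  | [], k => [k]
  | y :: t, k => if y > k then k :: t else y :: insPat t k

def solve_alt (nums : List Int) : Int :=
  ((nums.foldl (fun s v => insPat s (-v)) []).length : Int)

-- ===== PRECONDITION & SPEC =====
-- Pre_ excludes lists containing an element ≤ 0: such an element can never satisfy
-- `bus > curr` (curr starts at 0), so A's queue never empties and A loops forever.
def Pre_solve (nums : List Int) : Prop := ∀ x ∈ nums, 0 < x
instance (nums : List Int) : Decidable (Pre_solve nums) := by unfold Pre_solve; infer_instance
def pvWitness_solve : List Int := [3, 1, 4, 1, 5, 9, 2, 6]

def Spec_solve (nums : List Int) (out : Int) : Prop := out = solve_alt nums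
instance (nums : List Int) (out : Int) : Decidable (Spec_solve nums out) := by unfold Spec_solve; infer_instance

-- ===== CLAIM (what is proved, stated in full; the proofs are below) =====
def Claim_equal_solve : Prop := ∀ (nums : List Int), Dom_solve nums → Pre_solve nums → Spec_solve nums (solve nums)

-- ===== LEMMAS AND PROOFS =====

-- fold of B's insertion from an arbitrary state
def patF (s : List Int) (l : List Int) : List Int := l.foldl (fun s v => insPat s (-v)) s

-- one pass of A peels exactly the head level of B's patience state
theorem patF_pass (q : List Int) : ∀ (curr : Int) (t : List Int),
    patF (-curr :: t) q = -((solvePass curr q).1) :: patF t (solvePass curr q).2 := by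
  induction q with
  | nil => intro curr t; simp [patF, solvePass]
  | cons b rest ih =>
      intro curr t
      by_cases h : b > curr
      · have h1 : insPat (-curr :: t) (-b) = -b :: t := by
          simp [insPat]; omega
        simp only [patF, List.foldl_cons, h1, solvePass, if_pos h]
        exact ih b t
      · have h1 : insPat (-curr :: t) (-b) = -curr :: insPat t (-b) := by
          simp [insPat]; omega
        simp only [patF, List.foldl_cons, h1, solvePass, if_neg h]
        have := ih curr (insPat t (-b))
        simp only [patF] at this
        simp [this]

theorem solvePass_len (q : List Int) : ∀ curr : Int, (solvePass curr q).2.length ≤ q.length := by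
  induction q with
  | nil => intro curr; simp [solvePass]
  | cons b rest ih =>
      intro curr
      by_cases h : b > curr
      · simp only [solvePass, if_pos h]
        exact Nat.le_succ_of_le (ih b)
      · simp only [solvePass, if_neg h, List.length_cons]
        exact Nat.succ_le_succ (ih curr)

theorem solvePass_mem (q : List Int) : ∀ (curr x : Int), x ∈ (solvePass curr q).2 → x ∈ q := by
  induction q with
  | nil => intro curr x hx; simp [solvePass] at hx
  | cons b rest ih =>
      intro curr x hx
      by_cases h : b > curr
      · simp only [solvePass, if_pos h] at hx
        exact List.mem_cons_of_mem b (ih b x hx)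
      · simp only [solvePass, if_neg h, List.mem_cons] at hx
        rcases hx with h1 | h1
        · simp [h1]
        · exact List.mem_cons_of_mem b (ih curr x h1)

theorem solveLoop_patF : ∀ (fuel : Nat) (q : List Int), q.length ≤ fuel →
    (∀ x ∈ q, 0 < x) → solveLoop fuel q = ((patF [] q).length : Int) := by
  intro fuel
  induction fuel with
  | zero =>
      intro q hlen _
      have : q = [] := List.eq_nil_of_length_eq_zero (Nat.le_zero.mp hlen)
      subst this; simp [solveLoop, patF]
  | succ f ih =>
      intro q hlen hpos
      match q with
      | [] => simp [solveLoop, patF]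
      | b :: rest =>
          have hb : 0 < b := hpos b (by simp)
          have hpass : solvePass 0 (b :: rest) = solvePass b rest := by
            simp [solvePass, hb]
          have hkey := patF_pass rest b ([] : List Int)
          have hlen' : (solvePass b rest).2.length ≤ f := by
            have h2 : (solvePass b rest).2.length ≤ rest.length := solvePass_len rest b
            simp only [List.length_cons] at hlen
            omega
          have hpos' : ∀ x ∈ (solvePass b rest).2, 0 < x := fun x hx =>
            hpos x (List.mem_cons_of_mem b (solvePass_mem rest b x hx))
          have hih := ih (solvePass b rest).2 hlen' hpos'
          have hstart : patF [] (b :: rest) = patF (-b :: []) rest := by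
            simp [patF, insPat]
          rw [show solveLoop (f + 1) (b :: rest)
                = 1 + solveLoop f (solvePass 0 (b :: rest)).2 from rfl,
              hpass, hih, hstart, hkey]
          simp
          omega

-- ===== VERDICT (by name: the statement is the Claim_ definition above) =====
theorem solve_spec : Claim_equal_solve := by
  intro nums _ hpre
  unfold Spec_solve solve solve_alt
  have := solveLoop_patF nums.length nums (le_refl _) hpre
  simpa [patF] using this
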